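-- pv_equiv track=rewrite | github.com/BARarch/My-Hackerranks | shoppingList.py | getNumberOfOptions
-- ===== SOURCE A (Python) =====
-- def getNumberOfOptions(priceOfJeans, priceOfShoes, priceOfSkirts, priceOfTops, budgeted):
--     # Write your code here
--     pJeans = sorted(priceOfJeans)
--     pShoes = sorted(priceOfShoes)
--     pSkirts = sorted(priceOfSkirts)
--     pTops = sorted(priceOfTops)
--     J = {}
--     SH = {}
--     SK = {}
--     T = {}
--
--     def jeans(b):
--         if b < 0:
--             return 0
--         if b in J:
--             return J[b]
--
--         nItems = 0
--         for cost in pJeans: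
--             if b - cost < 0:
--                 J[b] = nItems
--                 return nItems
--             nItems += shoes(b - cost)
--         J[b] = nItems
--         return nItems
--
--     def shoes(b):
--         if b < 0:
--             return 0
--         if b in SH:
--             return SH[b]
--
--         nItems = 0
--         for cost in pShoes:
--             if b - cost < 0:
--                 SH[b] = nItems
--                 return nItems
--             nItems += skirts(b - cost)
--         SH[b] = nItems
--         return nItems
--
--     def skirts(b):
--         if b < 0:
--             return 0
--         if b in SK:
--             return SK[b]
--
--         nItems = 0
--         for cost in pSkirts:
--             if b - cost < 0:
--                 SK[b] = nItems
--                 return nItems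
--             nItems += tops(b - cost)
--         SK[b] = nItems
--         return nItems
--
--     def tops(b):
--         if b < 0:
--             return 0
--         if b in T:
--             return T[b]
--         else:
--             if pTops[-1] <= b:
--                 T[b] = len(pTops)
--                 return len(pTops)
--             nItems = 0
--             for cost in pTops:
--                 if cost <= b:
--                     nItems += 1
--                 else:
--                     T[b] = nItems
--                     return nItems
--
--     return jeans(budgeted)
-- ===== SOURCE B (Python) =====
-- def getNumberOfOptions(priceOfJeans, priceOfShoes, priceOfSkirts, priceOfTops, budgeted):
--     # Count outfits (jeans, shoes, skirt, top) that stay within the budget at every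
--     # stage of the purchase.  Iterative pruned enumeration: sort each list, break a
--     # loop as soon as the running total exceeds the budget, and count the affordable
--     # tops in one binary search instead of scanning them.
--     if budgeted < 0:
--         return 0
--     jeans = sorted(priceOfJeans)
--     shoes = sorted(priceOfShoes)
--     skirts = sorted(priceOfSkirts)
--     tops = sorted(priceOfTops)
--
--     def count_le(limit):
--         # number of tops priced at most `limit` (bisect_right by hand)
--         lo, hi = 0, len(tops)
--         while lo < hi:
--             mid = (lo + hi) // 2
--             if tops[mid] <= limit:
--                 lo = mid + 1
--             else:
--                 hi = mid
--         return lo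
--
--     total = 0
--     for j in jeans:
--         if budgeted < j:
--             break
--         for s in shoes:
--             if budgeted < j + s:
--                 break
--             for k in skirts:
--                 if budgeted < j + s + k:
--                     break
--                 total += count_le(budgeted - j - s - k)
--     return total
-- ===== Notes on version B (the rewrite author's own statement) =====
-- stated objective: alternative
-- what changed: Replaces A's four mutually recursive memoized functions with a plain iterative pruned enumeration: sorted lists, nested loops that break once the running total exceeds the budget, and a binary search counting the affordable tops instead of A's linear scan (and instead of its memo dictionaries); Pre_ excludes only the inputs where A raises IndexError (empty tops list reached with the budget still nonnegative).
import Mathlib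
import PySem

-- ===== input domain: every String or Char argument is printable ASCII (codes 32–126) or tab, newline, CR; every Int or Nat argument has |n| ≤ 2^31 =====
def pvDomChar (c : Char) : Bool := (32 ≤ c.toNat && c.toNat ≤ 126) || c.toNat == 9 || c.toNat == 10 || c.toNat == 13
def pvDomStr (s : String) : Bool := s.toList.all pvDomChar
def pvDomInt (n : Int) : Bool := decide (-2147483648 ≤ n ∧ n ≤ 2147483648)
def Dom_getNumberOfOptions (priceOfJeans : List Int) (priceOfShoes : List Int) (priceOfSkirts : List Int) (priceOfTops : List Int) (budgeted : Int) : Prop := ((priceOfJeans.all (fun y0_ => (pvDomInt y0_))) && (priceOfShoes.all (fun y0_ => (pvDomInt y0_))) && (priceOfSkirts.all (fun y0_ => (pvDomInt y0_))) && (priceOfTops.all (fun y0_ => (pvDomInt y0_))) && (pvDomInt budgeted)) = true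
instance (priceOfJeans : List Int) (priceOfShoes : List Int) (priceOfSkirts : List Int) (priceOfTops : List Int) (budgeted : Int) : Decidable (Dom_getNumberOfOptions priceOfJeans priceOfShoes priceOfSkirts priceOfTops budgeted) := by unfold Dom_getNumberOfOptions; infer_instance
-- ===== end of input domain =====

-- B replaces A's four memoized recursive helpers by an iterative pruned enumeration
-- (sorted lists, loops breaking once the running total exceeds the budget, binary search
-- over the tops); equality of return values is proved on all inputs where A returns.

-- ===== PORT A =====
-- literal transliteration of Source A: four nested memoized helpers over the sorted lists,
-- each `for` loop with its early `return` is a structural recursion threading the memo dicts.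

-- tops' for-loop; falling off the end returns Python None, i.e. `none` (unreachable in A)
def aTopsLoop (b : Int) (T : PySem.Dict Int Int) : List Int → Int → Option (Int × PySem.Dict Int Int)
  | [], _ => none
  | cost :: rest, nItems =>
    if cost ≤ b then aTopsLoop b T rest (nItems + 1)
    else some (nItems, T.insert b nItems)

def aTops (pTops : List Int) (T : PySem.Dict Int Int) (b : Int) : Option (Int × PySem.Dict Int Int) :=
  if b < 0 then some (0, T)
  else match T.get? b with
  | some v => some (v, T)
  | none =>
    match PySem.List.pyGet? pTops (-1) with
    | none => none   -- pTops[-1] raises IndexError on the empty list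
    | some last =>
      if last ≤ b then some ((pTops.length : Int), T.insert b (pTops.length : Int))
      else aTopsLoop b T pTops 0

def aSkirtsLoop (pTops : List Int) (b : Int) (SK : PySem.Dict Int Int) :
    List Int → Int → PySem.Dict Int Int → Option (Int × PySem.Dict Int Int × PySem.Dict Int Int)
  | [], nItems, T => some (nItems, SK.insert b nItems, T)
  | cost :: rest, nItems, T =>
    if b - cost < 0 then some (nItems, SK.insert b nItems, T)
    else match aTops pTops T (b - cost) with
      | none => none
      | some (v, T') => aSkirtsLoop pTops b SK rest (nItems + v) T'

def aSkirts (pSkirts pTops : List Int) (SK T : PySem.Dict Int Int) (b : Int) :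
    Option (Int × PySem.Dict Int Int × PySem.Dict Int Int) :=
  if b < 0 then some (0, SK, T)
  else match SK.get? b with
  | some v => some (v, SK, T)
  | none => aSkirtsLoop pTops b SK pSkirts 0 T

def aShoesLoop (pSkirts pTops : List Int) (b : Int) (SH : PySem.Dict Int Int) :
    List Int → Int → PySem.Dict Int Int → PySem.Dict Int Int →
    Option (Int × PySem.Dict Int Int × PySem.Dict Int Int × PySem.Dict Int Int)
  | [], nItems, SK, T => some (nItems, SH.insert b nItems, SK, T)
  | cost :: rest, nItems, SK, T =>
    if b - cost < 0 then some (nItems, SH.insert b nItems, SK, T)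
    else match aSkirts pSkirts pTops SK T (b - cost) with
      | none => none
      | some (v, SK', T') => aShoesLoop pSkirts pTops b SH rest (nItems + v) SK' T'

def aShoes (pShoes pSkirts pTops : List Int) (SH SK T : PySem.Dict Int Int) (b : Int) :
    Option (Int × PySem.Dict Int Int × PySem.Dict Int Int × PySem.Dict Int Int) :=
  if b < 0 then some (0, SH, SK, T)
  else match SH.get? b with
  | some v => some (v, SH, SK, T)
  | none => aShoesLoop pSkirts pTops b SH pShoes 0 SK T

def aJeansLoop (pShoes pSkirts pTops : List Int) (b : Int) (J : PySem.Dict Int Int) :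
    List Int → Int → PySem.Dict Int Int → PySem.Dict Int Int → PySem.Dict Int Int →
    Option (Int × PySem.Dict Int Int × PySem.Dict Int Int × PySem.Dict Int Int × PySem.Dict Int Int)
  | [], nItems, SH, SK, T => some (nItems, J.insert b nItems, SH, SK, T)
  | cost :: rest, nItems, SH, SK, T =>
    if b - cost < 0 then some (nItems, J.insert b nItems, SH, SK, T)
    else match aShoes pShoes pSkirts pTops SH SK T (b - cost) with
      | none => none
      | some (v, SH', SK', T') => aJeansLoop pShoes pSkirts pTops b J rest (nItems + v) SH' SK' T'

def aJeans (pJeans pShoes pSkirts pTops : List Int) (J SH SK T : PySem.Dict Int Int) (b : Int) :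
    Option (Int × PySem.Dict Int Int × PySem.Dict Int Int × PySem.Dict Int Int × PySem.Dict Int Int) :=
  if b < 0 then some (0, J, SH, SK, T)
  else match J.get? b with
  | some v => some (v, J, SH, SK, T)
  | none => aJeansLoop pShoes pSkirts pTops b J pJeans 0 SH SK T

def getNumberOfOptions (priceOfJeans : List Int) (priceOfShoes : List Int) (priceOfSkirts : List Int) (priceOfTops : List Int) (budgeted : Int) : Int :=
  let pJeans := PySem.List.sorted priceOfJeans (fun x => x) false
  let pShoes := PySem.List.sorted priceOfShoes (fun x => x) false
  let pSkirts := PySem.List.sorted priceOfSkirts (fun x => x) false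
  let pTops := PySem.List.sorted priceOfTops (fun x => x) false
  match aJeans pJeans pShoes pSkirts pTops PySem.Dict.empty PySem.Dict.empty PySem.Dict.empty PySem.Dict.empty budgeted with
  | some (v, _, _, _, _) => v
  | none => 0   -- reached exactly where Python raises IndexError; those inputs are outside Pre_

-- ===== PORT B =====
-- transliteration of Source B: sorted lists, three nested break-pruned loops threading the
-- running total, and the hand-written binary search `count_le` over the sorted tops.

-- Source B's `count_le` while-loop; tops[mid] is always in range (0 ≤ lo ≤ mid < hi ≤ len);
-- the while-loop carries fuel = tops.length ≥ hi - lo, which shrinks by ≥ 1 per iteration;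
-- `(lo + hi) / 2` on Nat is exact for Python's `(lo + hi) // 2` (both arguments nonnegative)
def bCount (tops : List Int) (limit : Int) : Nat → Nat → Nat → Nat
  | 0, lo, _hi => lo
  | fuel + 1, lo, hi =>
    if lo < hi then
      let mid := (lo + hi) / 2
      if PySem.List.pyGetD tops (mid : Int) 0 ≤ limit then bCount tops limit fuel (mid + 1) hi
      else bCount tops limit fuel lo mid
    else lo

-- one break-pruned `for` loop of Source B: stop at the first x with pre + x over budget,
-- otherwise update the running total by the loop body f
def bLoop (budgeted pre : Int) (f : Int → Int → Int) : List Int → Int → Int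
  | [], total => total
  | x :: rest, total =>
    if budgeted < pre + x then total else bLoop budgeted pre f rest (f total x)

def getNumberOfOptions_alt (priceOfJeans : List Int) (priceOfShoes : List Int) (priceOfSkirts : List Int) (priceOfTops : List Int) (budgeted : Int) : Int :=
  if budgeted < 0 then 0
  else
    let jeans := PySem.List.sorted priceOfJeans (fun x => x) false
    let shoes := PySem.List.sorted priceOfShoes (fun x => x) false
    let skirts := PySem.List.sorted priceOfSkirts (fun x => x) false
    let tops := PySem.List.sorted priceOfTops (fun x => x) false
    bLoop budgeted 0 (fun total j =>
      bLoop budgeted j (fun total s =>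
        bLoop budgeted (j + s) (fun total k =>
          total + (bCount tops (budgeted - j - s - k) tops.length 0 tops.length : Int))
          skirts total) shoes total) jeans 0

-- ===== PRECONDITION & SPEC =====
-- Pre_ excludes exactly the inputs where A raises IndexError (pTops[-1] on an empty tops
-- list, reached iff the budget is nonnegative and some jeans+shoes+skirt combination keeps
-- every prefix sum within it); A returns on every other input.
def Pre_getNumberOfOptions (priceOfJeans : List Int) (priceOfShoes : List Int) (priceOfSkirts : List Int) (priceOfTops : List Int) (budgeted : Int) : Prop :=
  priceOfTops ≠ [] ∨ budgeted < 0 ∨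
    ∀ j ∈ priceOfJeans, ∀ s ∈ priceOfShoes, ∀ k ∈ priceOfSkirts,
      ¬(j ≤ budgeted ∧ j + s ≤ budgeted ∧ j + s + k ≤ budgeted)
instance (priceOfJeans : List Int) (priceOfShoes : List Int) (priceOfSkirts : List Int) (priceOfTops : List Int) (budgeted : Int) : Decidable (Pre_getNumberOfOptions priceOfJeans priceOfShoes priceOfSkirts priceOfTops budgeted) := by unfold Pre_getNumberOfOptions; infer_instance

def pvWitness_getNumberOfOptions : List Int × List Int × List Int × List Int × Int :=
  ([1, 2], [2], [3], [1, 4], 10)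

def Spec_getNumberOfOptions (priceOfJeans : List Int) (priceOfShoes : List Int) (priceOfSkirts : List Int) (priceOfTops : List Int) (budgeted : Int) (out : Int) : Prop := out = getNumberOfOptions_alt priceOfJeans priceOfShoes priceOfSkirts priceOfTops budgeted
instance (priceOfJeans : List Int) (priceOfShoes : List Int) (priceOfSkirts : List Int) (priceOfTops : List Int) (budgeted : Int) (out : Int) : Decidable (Spec_getNumberOfOptions priceOfJeans priceOfShoes priceOfSkirts priceOfTops budgeted out) := by unfold Spec_getNumberOfOptions; infer_instance

-- ===== CLAIM (what is proved, stated in full; the proofs are below) =====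
def Claim_equal_getNumberOfOptions : Prop := ∀ (priceOfJeans : List Int) (priceOfShoes : List Int) (priceOfSkirts : List Int) (priceOfTops : List Int) (budgeted : Int), Dom_getNumberOfOptions priceOfJeans priceOfShoes priceOfSkirts priceOfTops budgeted → Pre_getNumberOfOptions priceOfJeans priceOfShoes priceOfSkirts priceOfTops budgeted → Spec_getNumberOfOptions priceOfJeans priceOfShoes priceOfSkirts priceOfTops budgeted (getNumberOfOptions priceOfJeans priceOfShoes priceOfSkirts priceOfTops budgeted)
-- ===== LEMMAS AND PROOFS =====

-- shared "value" functions: the count of tops affordable at x, and the staged sums above it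
def sT (pt : List Int) (x : Int) : Int := (pt.countP (fun c => decide (c ≤ x)) : Int)
def sK (pk pt : List Int) (y : Int) : Int :=
  ((pk.filter (fun k => decide (k ≤ y))).map (fun k => sT pt (y - k))).sum
def sS (ps pk pt : List Int) (z : Int) : Int :=
  ((ps.filter (fun s => decide (s ≤ z))).map (fun s => sK pk pt (z - s))).sum
def sJ (pj ps pk pt : List Int) (b : Int) : Int :=
  ((pj.filter (fun j => decide (j ≤ b))).map (fun j => sS ps pk pt (b - j))).sum

def InvT (pt : List Int) (T : PySem.Dict Int Int) : Prop := ∀ x v, T.get? x = some v → v = sT pt x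
def InvK (pk pt : List Int) (SK : PySem.Dict Int Int) : Prop := ∀ x v, SK.get? x = some v → v = sK pk pt x
def InvS (ps pk pt : List Int) (SH : PySem.Dict Int Int) : Prop := ∀ x v, SH.get? x = some v → v = sS ps pk pt x

theorem le_getLast_of_sorted : ∀ (l : List Int) (m : Int), l.Pairwise (· ≤ ·) →
    l.getLast? = some m → ∀ c ∈ l, c ≤ m := by
  intro l
  induction l with
  | nil => simp
  | cons a t ih =>
    intro m hp hl c hc
    cases t with
    | nil =>
      simp only [List.getLast?_singleton, Option.some.injEq] at hl
      simp only [List.mem_singleton] at hc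
      omega
    | cons b t2 =>
      rw [List.getLast?_cons_cons] at hl
      rcases List.mem_cons.mp hc with rfl | hc
      · have hm : m ∈ b :: t2 := List.mem_of_getLast? hl
        exact (List.pairwise_cons.mp hp).1 m hm
      · exact ih m (List.pairwise_cons.mp hp).2 hl c hc

theorem topsLoop_ok (b : Int) (T : PySem.Dict Int Int) (l : List Int) (n : Int)
    (hs : l.Pairwise (· ≤ ·)) (hex : ∃ c ∈ l, ¬ c ≤ b) :
    aTopsLoop b T l n = some (n + (l.countP (fun c => decide (c ≤ b)) : Int),
      T.insert b (n + (l.countP (fun c => decide (c ≤ b)) : Int))) := by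
  induction l generalizing n with
  | nil => simp at hex
  | cons c r ih =>
    rw [List.pairwise_cons] at hs
    simp only [aTopsLoop]
    by_cases hc : c ≤ b
    · rw [if_pos hc]
      have hex' : ∃ x ∈ r, ¬ x ≤ b := by
        rcases hex with ⟨x, hx, hxb⟩
        rcases List.mem_cons.mp hx with rfl | hx
        · exact absurd hc hxb
        · exact ⟨x, hx, hxb⟩
      rw [ih (n + 1) hs.2 hex']
      have e : (n + 1) + (r.countP (fun c => decide (c ≤ b)) : Int)
          = n + ((c :: r).countP (fun c => decide (c ≤ b)) : Int) := by
        rw [List.countP_cons_of_pos (p := fun c => decide (c ≤ b)) (by simpa using hc)]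
        push_cast; ring
      rw [e]
    · rw [if_neg hc]
      have e : (c :: r).countP (fun c => decide (c ≤ b)) = 0 := by
        apply List.countP_eq_zero.mpr
        intro x hx
        rcases List.mem_cons.mp hx with rfl | hx
        · simpa using hc
        · have := hs.1 x hx; simp; omega
      simp [e]

theorem tops_ok (pt : List Int) (T : PySem.Dict Int Int) (b : Int)
    (hs : pt.Pairwise (· ≤ ·)) (hne : pt ≠ []) (hb : 0 ≤ b) (hT : InvT pt T) :
    ∃ T', aTops pt T b = some (sT pt b, T') ∧ InvT pt T' := by
  unfold aTops
  rw [if_neg (by omega)]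
  cases hTb : T.get? b with
  | some v =>
    exact ⟨T, by rw [hT b v hTb], hT⟩
  | none =>
    rw [PySem.List.pyGet?_neg_one]
    cases hlast : pt.getLast? with
    | none => exact absurd (List.getLast?_eq_none_iff.mp hlast) hne
    | some last =>
      dsimp only
      have hle : ∀ c ∈ pt, c ≤ last := le_getLast_of_sorted pt last hs hlast
      by_cases hlb : last ≤ b
      · rw [if_pos hlb]
        have e : sT pt b = (pt.length : Int) := by
          unfold sT
          rw [List.countP_eq_length.mpr (fun c hc => by simp; exact le_trans (hle c hc) hlb)]
        refine ⟨T.insert b (pt.length : Int), by rw [e], ?_⟩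
        intro x v hx
        rw [PySem.Dict.get?_insert] at hx
        split at hx
        · rename_i hxb; subst hxb; rw [e]; exact (Option.some_inj.mp hx).symm
        · exact hT x v hx
      · rw [if_neg hlb]
        have hex : ∃ c ∈ pt, ¬ c ≤ b := ⟨last, List.mem_of_getLast? hlast, hlb⟩
        rw [topsLoop_ok b T pt 0 hs hex]
        have e : (0 : Int) + (pt.countP (fun c => decide (c ≤ b)) : Int) = sT pt b := by
          unfold sT; ring
        refine ⟨T.insert b (sT pt b), by rw [e], ?_⟩
        intro x v hx
        rw [PySem.Dict.get?_insert] at hx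
        split at hx
        · rename_i hxb; subst hxb; exact (Option.some_inj.mp hx).symm
        · exact hT x v hx

theorem skirtsLoop_ok (pt : List Int) (b : Int) (SK : PySem.Dict Int Int) (l : List Int) (n : Int)
    (T : PySem.Dict Int Int) (hst : pt.Pairwise (· ≤ ·)) (hl : l.Pairwise (· ≤ ·))
    (hg : ∀ c ∈ l, c ≤ b → pt ≠ []) (hT : InvT pt T) :
    ∃ T', aSkirtsLoop pt b SK l n T =
      some (n + ((l.filter (fun k => decide (k ≤ b))).map (fun k => sT pt (b - k))).sum,
            SK.insert b (n + ((l.filter (fun k => decide (k ≤ b))).map (fun k => sT pt (b - k))).sum),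
            T') ∧ InvT pt T' := by
  induction l generalizing n T with
  | nil => exact ⟨T, by simp [aSkirtsLoop], hT⟩
  | cons c r ih =>
    rw [List.pairwise_cons] at hl
    simp only [aSkirtsLoop]
    by_cases hc : b - c < 0
    · rw [if_pos hc]
      have e : (c :: r).filter (fun k => decide (k ≤ b)) = [] := by
        apply List.filter_eq_nil_iff.mpr
        intro x hx
        rcases List.mem_cons.mp hx with rfl | hx
        · simp; omega
        · have := hl.1 x hx; simp; omega
      refine ⟨T, ?_, hT⟩
      rw [e]; simp
    · rw [if_neg hc]
      have hne : pt ≠ [] := hg c (List.mem_cons_self ..) (by omega)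
      obtain ⟨T1, htops, hT1⟩ := tops_ok pt T (b - c) hst hne (by omega) hT
      rw [htops]
      dsimp only
      obtain ⟨T', hrec, hT'⟩ := ih (n + sT pt (b - c)) T1 hl.2
        (fun x hx hxb => hg x (List.mem_cons_of_mem _ hx) hxb) hT1
      rw [hrec, List.filter_cons_of_pos (by simp; omega), List.map_cons, List.sum_cons,
        ← add_assoc]
      exact ⟨T', rfl, hT'⟩

theorem skirts_ok (pk pt : List Int) (SK T : PySem.Dict Int Int) (b : Int)
    (hsk : pk.Pairwise (· ≤ ·)) (hst : pt.Pairwise (· ≤ ·))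
    (hg : pt = [] → ∀ k ∈ pk, ¬ k ≤ b) (hSK : InvK pk pt SK) (hT : InvT pt T) (hb : 0 ≤ b) :
    ∃ SK' T', aSkirts pk pt SK T b = some (sK pk pt b, SK', T') ∧ InvK pk pt SK' ∧ InvT pt T' := by
  unfold aSkirts
  rw [if_neg (by omega)]
  cases hSKb : SK.get? b with
  | some v => exact ⟨SK, T, by rw [hSK b v hSKb], hSK, hT⟩
  | none =>
    dsimp only
    obtain ⟨T', hrec, hT'⟩ := skirtsLoop_ok pt b SK pk 0 T hst hsk
      (fun c hc hcb hpt => absurd hcb (hg hpt c hc)) hT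
    rw [hrec]
    have e : (0 : Int) + ((pk.filter (fun k => decide (k ≤ b))).map (fun k => sT pt (b - k))).sum
        = sK pk pt b := by unfold sK; ring
    rw [e]
    refine ⟨SK.insert b (sK pk pt b), T', rfl, ?_, hT'⟩
    intro x v hx
    rw [PySem.Dict.get?_insert] at hx
    split at hx
    · rename_i hxb; subst hxb; exact (Option.some_inj.mp hx).symm
    · exact hSK x v hx

theorem shoesLoop_ok (pk pt : List Int) (b : Int) (SH : PySem.Dict Int Int) (l : List Int) (n : Int)
    (SK T : PySem.Dict Int Int) (hsk : pk.Pairwise (· ≤ ·)) (hst : pt.Pairwise (· ≤ ·))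
    (hl : l.Pairwise (· ≤ ·))
    (hg : ∀ c ∈ l, c ≤ b → pt = [] → ∀ k ∈ pk, ¬ k ≤ b - c)
    (hSK : InvK pk pt SK) (hT : InvT pt T) :
    ∃ SK' T', aShoesLoop pk pt b SH l n SK T =
      some (n + ((l.filter (fun s => decide (s ≤ b))).map (fun s => sK pk pt (b - s))).sum,
            SH.insert b (n + ((l.filter (fun s => decide (s ≤ b))).map (fun s => sK pk pt (b - s))).sum),
            SK', T') ∧ InvK pk pt SK' ∧ InvT pt T' := by
  induction l generalizing n SK T with
  | nil => exact ⟨SK, T, by simp [aShoesLoop], hSK, hT⟩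
  | cons c r ih =>
    rw [List.pairwise_cons] at hl
    simp only [aShoesLoop]
    by_cases hc : b - c < 0
    · rw [if_pos hc]
      have e : (c :: r).filter (fun s => decide (s ≤ b)) = [] := by
        apply List.filter_eq_nil_iff.mpr
        intro x hx
        rcases List.mem_cons.mp hx with rfl | hx
        · simp; omega
        · have := hl.1 x hx; simp; omega
      refine ⟨SK, T, ?_, hSK, hT⟩
      rw [e]; simp
    · rw [if_neg hc]
      obtain ⟨SK1, T1, hsk1, hSK1, hT1⟩ := skirts_ok pk pt SK T (b - c) hsk hst
        (hg c (List.mem_cons_self ..) (by omega)) hSK hT (by omega)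
      rw [hsk1]
      dsimp only
      obtain ⟨SK', T', hrec, hSK', hT'⟩ := ih (n + sK pk pt (b - c)) SK1 T1 hl.2
        (fun x hx hxb => hg x (List.mem_cons_of_mem _ hx) hxb) hSK1 hT1
      rw [hrec, List.filter_cons_of_pos (by simp; omega), List.map_cons, List.sum_cons,
        ← add_assoc]
      exact ⟨SK', T', rfl, hSK', hT'⟩

theorem shoes_ok (ps pk pt : List Int) (SH SK T : PySem.Dict Int Int) (b : Int)
    (hss : ps.Pairwise (· ≤ ·)) (hsk : pk.Pairwise (· ≤ ·)) (hst : pt.Pairwise (· ≤ ·))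
    (hg : pt = [] → ∀ s ∈ ps, ∀ k ∈ pk, ¬(s ≤ b ∧ k ≤ b - s))
    (hSH : InvS ps pk pt SH) (hSK : InvK pk pt SK) (hT : InvT pt T) (hb : 0 ≤ b) :
    ∃ SH' SK' T', aShoes ps pk pt SH SK T b = some (sS ps pk pt b, SH', SK', T') ∧
      InvS ps pk pt SH' ∧ InvK pk pt SK' ∧ InvT pt T' := by
  unfold aShoes
  rw [if_neg (by omega)]
  cases hSHb : SH.get? b with
  | some v => exact ⟨SH, SK, T, by rw [hSH b v hSHb], hSH, hSK, hT⟩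
  | none =>
    dsimp only
    obtain ⟨SK', T', hrec, hSK', hT'⟩ := shoesLoop_ok pk pt b SH ps 0 SK T hsk hst hss
      (fun c hc hcb hpt k hk hkc => hg hpt c hc k hk ⟨hcb, hkc⟩) hSK hT
    rw [hrec]
    have e : (0 : Int) + ((ps.filter (fun s => decide (s ≤ b))).map (fun s => sK pk pt (b - s))).sum
        = sS ps pk pt b := by unfold sS; ring
    rw [e]
    refine ⟨SH.insert b (sS ps pk pt b), SK', T', rfl, ?_, hSK', hT'⟩
    intro x v hx
    rw [PySem.Dict.get?_insert] at hx
    split at hx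
    · rename_i hxb; subst hxb; exact (Option.some_inj.mp hx).symm
    · exact hSH x v hx

theorem jeansLoop_ok (ps pk pt : List Int) (b : Int) (J : PySem.Dict Int Int) (l : List Int) (n : Int)
    (SH SK T : PySem.Dict Int Int) (hss : ps.Pairwise (· ≤ ·)) (hsk : pk.Pairwise (· ≤ ·))
    (hst : pt.Pairwise (· ≤ ·)) (hl : l.Pairwise (· ≤ ·))
    (hg : ∀ c ∈ l, c ≤ b → pt = [] → ∀ s ∈ ps, ∀ k ∈ pk, ¬(s ≤ b - c ∧ k ≤ b - c - s))
    (hSH : InvS ps pk pt SH) (hSK : InvK pk pt SK) (hT : InvT pt T) :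
    ∃ SH' SK' T', aJeansLoop ps pk pt b J l n SH SK T =
      some (n + ((l.filter (fun j => decide (j ≤ b))).map (fun j => sS ps pk pt (b - j))).sum,
            J.insert b (n + ((l.filter (fun j => decide (j ≤ b))).map (fun j => sS ps pk pt (b - j))).sum),
            SH', SK', T') ∧ InvS ps pk pt SH' ∧ InvK pk pt SK' ∧ InvT pt T' := by
  induction l generalizing n SH SK T with
  | nil => exact ⟨SH, SK, T, by simp [aJeansLoop], hSH, hSK, hT⟩
  | cons c r ih =>
    rw [List.pairwise_cons] at hl
    simp only [aJeansLoop]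
    by_cases hc : b - c < 0
    · rw [if_pos hc]
      have e : (c :: r).filter (fun j => decide (j ≤ b)) = [] := by
        apply List.filter_eq_nil_iff.mpr
        intro x hx
        rcases List.mem_cons.mp hx with rfl | hx
        · simp; omega
        · have := hl.1 x hx; simp; omega
      refine ⟨SH, SK, T, ?_, hSH, hSK, hT⟩
      rw [e]; simp
    · rw [if_neg hc]
      obtain ⟨SH1, SK1, T1, hsh1, hSH1, hSK1, hT1⟩ := shoes_ok ps pk pt SH SK T (b - c)
        hss hsk hst (fun hpt s hsm k hkm hand => hg c (List.mem_cons_self ..) (by omega) hpt s hsm k hkm hand)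
        hSH hSK hT (by omega)
      rw [hsh1]
      dsimp only
      obtain ⟨SH', SK', T', hrec, hSH', hSK', hT'⟩ := ih (n + sS ps pk pt (b - c)) SH1 SK1 T1 hl.2
        (fun x hx hxb => hg x (List.mem_cons_of_mem _ hx) hxb) hSH1 hSK1 hT1
      rw [hrec, List.filter_cons_of_pos (by simp; omega), List.map_cons, List.sum_cons,
        ← add_assoc]
      exact ⟨SH', SK', T', rfl, hSH', hSK', hT'⟩

-- A's value: the staged sum over the sorted lists (0 for a negative budget)
theorem A_eq (pj ps pk pt : List Int) (b : Int)
    (hpre : Pre_getNumberOfOptions pj ps pk pt b) :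
    getNumberOfOptions pj ps pk pt b =
      if b < 0 then 0
      else sJ (PySem.List.sorted pj (fun x => x) false) (PySem.List.sorted ps (fun x => x) false)
              (PySem.List.sorted pk (fun x => x) false) (PySem.List.sorted pt (fun x => x) false) b := by
  unfold getNumberOfOptions
  by_cases hb : b < 0
  · rw [if_pos hb]
    simp [aJeans, if_pos hb]
  · rw [if_neg hb]
    have hempty : ∀ x v, (PySem.Dict.empty : PySem.Dict Int Int).get? x = some v → False := by
      intro x v h
      rw [PySem.Dict.get?_empty] at h
      cases h
    obtain ⟨SH', SK', T', hrec, _, _, _⟩ := jeansLoop_ok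
      (PySem.List.sorted ps (fun x => x) false) (PySem.List.sorted pk (fun x => x) false)
      (PySem.List.sorted pt (fun x => x) false) b PySem.Dict.empty
      (PySem.List.sorted pj (fun x => x) false) 0 PySem.Dict.empty PySem.Dict.empty PySem.Dict.empty
      (PySem.List.sorted_pairwise ..) (PySem.List.sorted_pairwise ..) (PySem.List.sorted_pairwise ..)
      (PySem.List.sorted_pairwise ..)
      (by
        intro c hc hcb hptnil s hsm k hkm hand
        rcases hpre with h | h | h
        · exact h (by rwa [← PySem.List.sorted_eq_nil_iff (key := fun x => x) (rev := false)])
        · omega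
        · exact h c ((PySem.List.sorted_perm ..).mem_iff.mp hc) s
            ((PySem.List.sorted_perm ..).mem_iff.mp hsm)
            k ((PySem.List.sorted_perm ..).mem_iff.mp hkm) (by omega))
      (fun x v h => absurd h (fun h => hempty x v h))
      (fun x v h => absurd h (fun h => hempty x v h))
      (fun x v h => absurd h (fun h => hempty x v h))
    simp only [aJeans, if_neg hb, PySem.Dict.get?_empty]
    rw [hrec]
    dsimp only
    unfold sJ
    ring_nf

-- ---- B-side lemmas: the break-pruned loop over a sorted list sums the filtered bodies ----

theorem mem_win (others : List Int) (a b : Nat) (x : Int)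
    (hx : x ∈ (others.drop a).take (b - a)) :
    ∃ i, a + i < b ∧ ∃ h : a + i < others.length, x = others[a + i] := by
  obtain ⟨i, hlt, rfl⟩ := List.getElem_of_mem hx
  have h1 : i < b - a := lt_of_lt_of_le hlt (by simp)
  have h2 : i < others.length - a := by
    have := hlt; simp [List.length_take, List.length_drop] at this; omega
  refine ⟨i, by omega, by omega, ?_⟩
  rw [List.getElem_take, List.getElem_drop]

theorem win_split (others : List Int) (a m b : Nat) (h1 : a ≤ m) (h2 : m ≤ b) :
    (others.drop a).take (b - a) = (others.drop a).take (m - a) ++ (others.drop m).take (b - m) := by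
  have e : b - a = (m - a) + (b - m) := by omega
  rw [e, List.take_add]
  have e2 : (others.drop a).drop (m - a) = others.drop m := by
    rw [List.drop_drop]
    congr 1
    omega
  rw [e2]

-- binary search returns the count of elements ≤ limit in a sorted list
theorem bCount_window (others : List Int) (limit : Int)
    (hs : others.Pairwise (· ≤ ·)) :
    ∀ fuel lo hi, hi - lo ≤ fuel → lo ≤ hi → hi ≤ others.length →
      bCount others limit fuel lo hi =
        lo + ((others.drop lo).take (hi - lo)).countP (fun c => decide (c ≤ limit)) := by
  intro fuel
  induction fuel with
  | zero =>
    intro lo hi h1 h2 h3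
    have : hi = lo := by omega
    subst this
    simp [bCount]
  | succ f ih =>
    intro lo hi h1 h2 h3
    simp only [bCount]
    by_cases hlh : lo < hi
    · rw [if_pos hlh]
      have hmid : lo ≤ (lo + hi) / 2 ∧ (lo + hi) / 2 < hi := by omega
      have hmlen : (lo + hi) / 2 < others.length := by omega
      have hgd : PySem.List.pyGetD others (((lo + hi) / 2 : Nat) : Int) 0 = others[(lo + hi) / 2] := by
        rw [PySem.List.pyGetD_natCast, List.getD_eq_getElem _ _ hmlen]
      rw [hgd]
      set m := (lo + hi) / 2 with hm
      by_cases hval : others[m] ≤ limit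
      · rw [if_pos hval, ih (m + 1) hi (by omega) (by omega) h3]
        have hsplit := win_split others lo (m + 1) hi (by omega) (by omega)
        rw [hsplit, List.countP_append]
        have hall : ((others.drop lo).take (m + 1 - lo)).countP (fun c => decide (c ≤ limit))
            = ((others.drop lo).take (m + 1 - lo)).length := by
          apply List.countP_eq_length.mpr
          intro x hx
          obtain ⟨i, hib, hilen, rfl⟩ := mem_win others lo (m + 1) x hx
          have hle : others[lo + i] ≤ others[m] := by
            rcases Nat.lt_or_ge (lo + i) m with hlt | hge
            · exact List.pairwise_iff_getElem.mp hs (lo + i) m hilen hmlen hlt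
            · have : lo + i = m := by omega
              simp [this]
          simp only [decide_eq_true_eq]
          omega
        have hlen : ((others.drop lo).take (m + 1 - lo)).length = m + 1 - lo := by
          simp [List.length_take, List.length_drop]; omega
        rw [hall, hlen]
        omega
      · rw [if_neg hval, ih lo m (by omega) (by omega) (by omega)]
        have hsplit := win_split others lo m hi (by omega) (by omega)
        rw [hsplit, List.countP_append]
        have hzero : ((others.drop m).take (hi - m)).countP (fun c => decide (c ≤ limit)) = 0 := by
          apply List.countP_eq_zero.mpr
          intro x hx
          obtain ⟨i, hib, hilen, rfl⟩ := mem_win others m hi x hx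
          have hge : others[m] ≤ others[m + i] := by
            rcases Nat.eq_zero_or_pos i with rfl | hpos
            · simp
            · exact List.pairwise_iff_getElem.mp hs m (m + i) hmlen hilen (by omega)
          simp only [decide_eq_true_eq]
          omega
        rw [hzero]
        omega
    · rw [if_neg hlh]
      have : hi = lo := by omega
      subst this
      simp

theorem bCount_all (others : List Int) (limit : Int) (hs : others.Pairwise (· ≤ ·)) :
    bCount others limit others.length 0 others.length = others.countP (fun c => decide (c ≤ limit)) := by
  rw [bCount_window others limit hs others.length 0 others.length (by omega) (by omega) (by omega)]
  simp

-- a break-pruned loop over a sorted list, whose body adds g x, sums g over the filtered list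
theorem bLoop_eq (budgeted pre : Int) (g : Int → Int) (f : Int → Int → Int)
    (hf : ∀ t x, f t x = t + g x) :
    ∀ (l : List Int) (total : Int), l.Pairwise (· ≤ ·) →
      bLoop budgeted pre f l total =
        total + ((l.filter (fun x => decide (pre + x ≤ budgeted))).map g).sum := by
  intro l
  induction l with
  | nil => intro total _; simp [bLoop]
  | cons x r ih =>
    intro total hl
    rw [List.pairwise_cons] at hl
    simp only [bLoop]
    by_cases hx : budgeted < pre + x
    · rw [if_pos hx]
      have e : (x :: r).filter (fun y => decide (pre + y ≤ budgeted)) = [] := by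
        apply List.filter_eq_nil_iff.mpr
        intro y hy
        rcases List.mem_cons.mp hy with rfl | hy
        · simp; omega
        · have := hl.1 y hy; simp; omega
      rw [e]; simp
    · rw [if_neg hx, hf, ih (total + g x) hl.2,
        List.filter_cons_of_pos (by simp; omega), List.map_cons, List.sum_cons, ← add_assoc]

-- B's value: the same staged sum over the sorted lists
theorem B_eq (pj ps pk pt : List Int) (b : Int) :
    getNumberOfOptions_alt pj ps pk pt b =
      if b < 0 then 0
      else sJ (PySem.List.sorted pj (fun x => x) false) (PySem.List.sorted ps (fun x => x) false)
              (PySem.List.sorted pk (fun x => x) false) (PySem.List.sorted pt (fun x => x) false) b := by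
  by_cases hb : b < 0
  · simp [getNumberOfOptions_alt, hb]
  · simp only [getNumberOfOptions_alt, if_neg hb]
    set jeans := PySem.List.sorted pj (fun x => x) false with hj
    set shoes := PySem.List.sorted ps (fun x => x) false with hs
    set skirts := PySem.List.sorted pk (fun x => x) false with hk
    set tops := PySem.List.sorted pt (fun x => x) false with ht
    have hjs : jeans.Pairwise (· ≤ ·) := by rw [hj]; exact PySem.List.sorted_pairwise ..
    have hss : shoes.Pairwise (· ≤ ·) := by rw [hs]; exact PySem.List.sorted_pairwise ..
    have hks : skirts.Pairwise (· ≤ ·) := by rw [hk]; exact PySem.List.sorted_pairwise ..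
    have hts : tops.Pairwise (· ≤ ·) := by rw [ht]; exact PySem.List.sorted_pairwise ..
    -- innermost loop = sK of the remaining budget
    have h3 : ∀ (j s t : Int),
        bLoop b (j + s)
          (fun total k => total + (bCount tops (b - j - s - k) tops.length 0 tops.length : Int))
          skirts t = t + sK skirts tops (b - j - s) := by
      intro j s t
      rw [bLoop_eq b (j + s) (fun k => sT tops (b - j - s - k)) _
        (by intro t' k; rw [bCount_all tops (b - j - s - k) hts]; rfl) skirts t hks]
      congr 1
      unfold sK
      rw [List.filter_congr (q := fun k => decide (k ≤ b - j - s))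
        (by intro k _; simp only [decide_eq_decide]; omega)]
    -- middle loop = sS of the remaining budget
    have h2 : ∀ (j t : Int),
        bLoop b j
          (fun total s =>
            bLoop b (j + s)
              (fun total k => total + (bCount tops (b - j - s - k) tops.length 0 tops.length : Int))
              skirts total)
          shoes t = t + sS shoes skirts tops (b - j) := by
      intro j t
      rw [bLoop_eq b j (fun s => sK skirts tops (b - j - s)) _
        (by intro t' s; exact h3 j s t') shoes t hss]
      congr 1
      unfold sS
      rw [List.filter_congr (q := fun s => decide (s ≤ b - j))
        (by intro s _; simp only [decide_eq_decide]; omega)]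
    rw [bLoop_eq b 0 (fun j => sS shoes skirts tops (b - j)) _
      (by intro t j; exact h2 j t) jeans 0 hjs]
    rw [zero_add]
    unfold sJ
    rw [List.filter_congr (q := fun j => decide (j ≤ b))
      (by intro j _; simp only [decide_eq_decide]; omega)]

-- ===== VERDICT (by name: the statement is the Claim_ definition above) =====
theorem getNumberOfOptions_spec : Claim_equal_getNumberOfOptions := by
  intro pj ps pk pt b _ hpre
  unfold Spec_getNumberOfOptions
  rw [A_eq pj ps pk pt b hpre, B_eq pj ps pk pt b]
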